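-- pv_equiv track=rewrite | github.com/wlghsp/ProblemSolving_Everyday | 프로그래머스/Level1/로또의 최고 순위와 최저 순위 /로또의최고순위와최저순위-1.py | solution
-- ===== SOURCE A (Python) =====
-- def solution(lottos, win_nums):
--     ranks = {cnt: rank for cnt, rank in zip(range(6, 1, -1), range(1, 6))}
--     ranks[0] = 6
--     ranks[1] = 6
--     min_cnt = len(set(lottos) & set(win_nums))
--     zero_cnt = lottos.count(0)
--     max_cnt = min(zero_cnt, 6 - min_cnt) + min_cnt
--     return [ranks[max_cnt], ranks[min_cnt]]
-- ===== SOURCE B (Python) =====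
-- def solution(lottos, win_nums):
--     # Sort both lists and count distinct common values with a two-pointer merge
--     # (no sets, no rank table); ranks come from the closed form min(7 - c, 6).
--     xs = sorted(lottos)
--     ys = sorted(win_nums)
--     matched = 0
--     i = j = 0
--     while i < len(xs) and j < len(ys):
--         if xs[i] < ys[j]:
--             i += 1
--         elif ys[j] < xs[i]:
--             j += 1
--         else:
--             v = xs[i]
--             matched += 1
--             while i < len(xs) and xs[i] == v:
--                 i += 1
--             while j < len(ys) and ys[j] == v:
--                 j += 1
--     zeros = lottos.count(0)
--     best = min(matched + zeros, 6)
--     return [min(7 - best, 6), min(7 - matched, 6)]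
-- ===== Notes on version B (the rewrite author's own statement) =====
-- stated objective: alternative
-- what changed: Replaces A's hash-set intersection and precomputed rank dictionary with sorting both lists and a two-pointer merge that counts distinct common values, plus a closed-form rank min(7-c,6) and best count min(matched+zeros,6).
import Mathlib
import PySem

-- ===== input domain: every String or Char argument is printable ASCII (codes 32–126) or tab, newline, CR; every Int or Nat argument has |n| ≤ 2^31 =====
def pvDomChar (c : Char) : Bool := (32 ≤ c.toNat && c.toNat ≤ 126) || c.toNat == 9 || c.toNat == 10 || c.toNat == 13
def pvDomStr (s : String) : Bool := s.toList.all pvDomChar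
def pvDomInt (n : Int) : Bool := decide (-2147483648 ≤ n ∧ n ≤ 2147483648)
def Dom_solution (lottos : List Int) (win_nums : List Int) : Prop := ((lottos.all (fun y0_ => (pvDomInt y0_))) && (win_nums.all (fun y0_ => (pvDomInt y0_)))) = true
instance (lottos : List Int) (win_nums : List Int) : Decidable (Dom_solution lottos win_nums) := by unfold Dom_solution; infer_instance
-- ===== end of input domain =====

-- B counts distinct common values by sorting both lists and running a two-pointer merge,
-- and maps counts to ranks with the closed form min(7-c,6) (objective: alternative).

-- ===== PORT A =====
-- the dict comprehension {cnt: rank for cnt, rank in zip(range(6,1,-1), range(1,6))} plus ranks[0]=6, ranks[1]=6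
def pvRanks : PySem.Dict Int Int :=
  let ranks := ((PySem.List.pyRange 6 1 (-1)).zip (PySem.List.pyRange 1 6 1)).foldl
    (fun d p => PySem.Dict.insert d p.1 p.2) PySem.Dict.empty
  let ranks := PySem.Dict.insert ranks 0 6
  PySem.Dict.insert ranks 1 6

def solution (lottos : List Int) (win_nums : List Int) : List Int :=
  let min_cnt : Int := PySem.Set.len (PySem.Set.inter (PySem.Set.ofList lottos) (PySem.Set.ofList win_nums))
  let zero_cnt : Int := (PySem.List.count lottos 0 : Nat)
  let max_cnt : Int := min zero_cnt (6 - min_cnt) + min_cnt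
  -- ranks[max_cnt] / ranks[min_cnt] raise KeyError when the key is missing; Pre_solution
  -- guarantees both keys are present, so getD is exact there
  [PySem.Dict.getD pvRanks max_cnt 0, PySem.Dict.getD pvRanks min_cnt 0]

-- ===== PORT B =====
-- the outer while loop over two sorted lists; the two inner `while xs[i] == v: i += 1`
-- skip loops are `dropWhile (· == v)` on the remaining suffix (exact: same elements skipped)
def mergeCount : List Int → List Int → Int
  | [], _ => 0
  | _ :: _, [] => 0
  | x :: xs, y :: ys =>
    if x < y then mergeCount xs (y :: ys)
    else if y < x then mergeCount (x :: xs) ys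
    else 1 + mergeCount (xs.dropWhile (· == x)) (ys.dropWhile (· == x))
termination_by xs ys => xs.length + ys.length
decreasing_by
  all_goals
    have h1 := List.length_dropWhile_le (· == x) xs
    have h2 := List.length_dropWhile_le (· == x) ys
    simp at *
  all_goals omega

def solution_alt (lottos : List Int) (win_nums : List Int) : List Int :=
  let xs := PySem.List.sorted lottos (fun v => v) false
  let ys := PySem.List.sorted win_nums (fun v => v) false
  let matched : Int := mergeCount xs ys
  let zeros : Int := (PySem.List.count lottos 0 : Nat)
  let best : Int := min (matched + zeros) 6
  [min (7 - best) 6, min (7 - matched) 6]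

-- ===== PRECONDITION & SPEC =====
-- Pre_ excludes inputs with more than 6 distinct values common to lottos and win_nums,
-- on which A raises KeyError (the rank table has no key above 6).
def Pre_solution (lottos : List Int) (win_nums : List Int) : Prop :=
  (lottos.toFinset ∩ win_nums.toFinset).card ≤ 6
instance (lottos : List Int) (win_nums : List Int) : Decidable (Pre_solution lottos win_nums) := by unfold Pre_solution; infer_instance
def pvWitness_solution : List Int × List Int := ([1, 2, 3, 0, 0, 44], [1, 2, 3, 4, 5, 6])

def Spec_solution (lottos : List Int) (win_nums : List Int) (out : List Int) : Prop := out = solution_alt lottos win_nums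
instance (lottos : List Int) (win_nums : List Int) (out : List Int) : Decidable (Spec_solution lottos win_nums out) := by unfold Spec_solution; infer_instance

-- ===== CLAIM (what is proved, stated in full; the proofs are below) =====
def Claim_equal_solution : Prop := ∀ (lottos : List Int) (win_nums : List Int), Dom_solution lottos win_nums → Pre_solution lottos win_nums → Spec_solution lottos win_nums (solution lottos win_nums)

-- ===== LEMMAS AND PROOFS =====

-- elements dropped by `dropWhile (· == x)` all equal x, so reinserting x restores the finset
lemma toFinset_insert_dropWhile_eq (x : Int) (xs : List Int) :
    insert x (xs.dropWhile (· == x)).toFinset = insert x xs.toFinset := by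
  induction xs with
  | nil => rfl
  | cons a t ih =>
    by_cases h : a = x
    · subst h
      simp only [List.dropWhile_cons, beq_self_eq_true, if_true, List.toFinset_cons,
        Finset.insert_idem]
      rw [ih]
    · simp [h]

-- on a sorted suffix whose elements are all ≥ x, dropping the leading x's leaves only values > x
lemma dropWhile_all_gt (x : Int) (xs : List Int) (hs : xs.Pairwise (· ≤ ·))
    (hle : ∀ a ∈ xs, x ≤ a) : ∀ a ∈ xs.dropWhile (· == x), x < a := by
  induction xs with
  | nil => simp
  | cons a t ih =>
    rw [List.pairwise_cons] at hs
    by_cases h : a = x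
    · subst h
      simp only [List.dropWhile_cons, beq_self_eq_true, if_true]
      exact ih hs.2 (fun b hb => hle b (List.mem_cons_of_mem _ hb))
    · simp only [List.dropWhile_cons, beq_iff_eq, h, if_false]
      intro b hb
      have hxa : x < a := lt_of_le_of_ne (hle a List.mem_cons_self) (fun e => h e.symm)
      rcases List.mem_cons.mp hb with rfl | hbt
      · exact hxa
      · exact lt_of_lt_of_le hxa (hs.1 b hbt)

-- mergeCount on two sorted lists computes the number of distinct common values
lemma mergeCount_eq_card (xs ys : List Int) (hx : xs.Pairwise (· ≤ ·)) (hy : ys.Pairwise (· ≤ ·)) :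
    mergeCount xs ys = ((xs.toFinset ∩ ys.toFinset).card : Int) := by
  induction xs, ys using mergeCount.induct with
  | case1 ys => simp [mergeCount]
  | case2 x xs => simp [mergeCount]
  | case3 x xs y ys h ih =>
    rw [List.pairwise_cons] at hx
    rw [List.pairwise_cons] at hy
    have hxny : x ∉ insert y ys.toFinset := by
      simp only [Finset.mem_insert, List.mem_toFinset]
      rintro (rfl | hm)
      · exact absurd h (lt_irrefl x)
      · exact absurd (lt_of_lt_of_le h (hy.1 x hm)) (lt_irrefl x)
    rw [mergeCount.eq_def]
    simp only [h, if_true]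
    rw [ih hx.2 (List.pairwise_cons.mpr hy)]
    simp only [List.toFinset_cons]
    rw [Finset.insert_inter_of_notMem hxny]
  | case4 x xs y ys h1 h2 ih =>
    rw [List.pairwise_cons] at hx
    rw [List.pairwise_cons] at hy
    have hynx : y ≠ x ∧ y ∉ xs :=
      ⟨ne_of_lt h2, fun hm => absurd (lt_of_lt_of_le h2 (hx.1 y hm)) (lt_irrefl y)⟩
    have hdrop : (x :: xs).toFinset ∩ (y :: ys).toFinset = (x :: xs).toFinset ∩ ys.toFinset := by
      ext z
      simp only [List.toFinset_cons, Finset.mem_inter, Finset.mem_insert, List.mem_toFinset]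
      constructor
      · rintro ⟨hz1, rfl | hz2⟩
        · rcases hz1 with rfl | hz1
          · exact absurd rfl hynx.1
          · exact absurd hz1 hynx.2
        · exact ⟨hz1, hz2⟩
      · rintro ⟨hz1, hz2⟩
        exact ⟨hz1, Or.inr hz2⟩
    rw [mergeCount.eq_def]
    simp only [h1, h2, if_true, if_false]
    rw [ih (List.pairwise_cons.mpr hx) hy.2, hdrop]
  | case5 x xs y ys h1 h2 ih =>
    have hxy : x = y := le_antisymm (not_lt.mp h2) (not_lt.mp h1)
    subst hxy
    rw [List.pairwise_cons] at hx
    rw [List.pairwise_cons] at hy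
    have hxA : ∀ a ∈ xs.dropWhile (· == x), x < a := dropWhile_all_gt x xs hx.2 hx.1
    have hxB : ∀ a ∈ ys.dropWhile (· == x), x < a := dropWhile_all_gt x ys hy.2 hy.1
    have hxA' : x ∉ (xs.dropWhile (· == x)).toFinset := by
      simp only [List.mem_toFinset]; intro hm; exact absurd (hxA x hm) (lt_irrefl x)
    have hxB' : x ∉ (ys.dropWhile (· == x)).toFinset := by
      simp only [List.mem_toFinset]; intro hm; exact absurd (hxB x hm) (lt_irrefl x)
    have hA : (x :: xs).toFinset = insert x (xs.dropWhile (· == x)).toFinset := by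
      rw [List.toFinset_cons, toFinset_insert_dropWhile_eq]
    have hB : (x :: ys).toFinset = insert x (ys.dropWhile (· == x)).toFinset := by
      rw [List.toFinset_cons, toFinset_insert_dropWhile_eq]
    have hins : insert x (xs.dropWhile (· == x)).toFinset ∩ insert x (ys.dropWhile (· == x)).toFinset
        = insert x ((xs.dropWhile (· == x)).toFinset ∩ (ys.dropWhile (· == x)).toFinset) := by
      ext z
      simp only [Finset.mem_inter, Finset.mem_insert]
      constructor
      · rintro ⟨hza, hzb⟩
        rcases hza with rfl | hza
        · exact Or.inl rfl
        · rcases hzb with rfl | hzb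
          · exact Or.inl rfl
          · exact Or.inr ⟨hza, hzb⟩
      · rintro (rfl | ⟨hza, hzb⟩)
        · exact ⟨Or.inl rfl, Or.inl rfl⟩
        · exact ⟨Or.inr hza, Or.inr hzb⟩
    have hnm : x ∉ (xs.dropWhile (· == x)).toFinset ∩ (ys.dropWhile (· == x)).toFinset := by
      simp only [Finset.mem_inter]; exact fun hc => hxA' hc.1
    rw [mergeCount.eq_def]
    simp only [h1, if_false]
    rw [ih (hx.2.sublist (List.dropWhile_sublist _)) (hy.2.sublist (List.dropWhile_sublist _)),
      hA, hB, hins, Finset.card_insert_of_notMem hnm]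
    push_cast
    ring

-- the length of A's set intersection is the card of the finset intersection
lemma setInterLen (l w : List Int) :
    (PySem.Set.len (PySem.Set.inter (PySem.Set.ofList l) (PySem.Set.ofList w)) : Int)
      = ((l.toFinset ∩ w.toFinset).card : Int) := by
  have hnd : (PySem.Set.inter (PySem.Set.ofList l) (PySem.Set.ofList w)).Nodup :=
    PySem.Set.nodup_inter _ _ (PySem.Set.nodup_ofList l)
  have hfs : (PySem.Set.inter (PySem.Set.ofList l) (PySem.Set.ofList w)).toFinset
      = l.toFinset ∩ w.toFinset := by
    ext z
    simp [List.mem_toFinset, PySem.Set.mem_inter, PySem.Set.mem_ofList]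
  have hlen : (PySem.Set.inter (PySem.Set.ofList l) (PySem.Set.ofList w)).toFinset.card
      = (PySem.Set.inter (PySem.Set.ofList l) (PySem.Set.ofList w)).length :=
    List.toFinset_card_of_nodup hnd
  have : PySem.Set.len (PySem.Set.inter (PySem.Set.ofList l) (PySem.Set.ofList w))
      = ((PySem.Set.inter (PySem.Set.ofList l) (PySem.Set.ofList w)).length : Int) := rfl
  rw [this, ← hlen, hfs]

-- A's rank table agrees with B's closed-form rank on all keys 0..6
lemma pvRanks_getD_eq (c : Int) (h0 : 0 ≤ c) (h6 : c ≤ 6) :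
    PySem.Dict.getD pvRanks c 0 = min (7 - c) 6 := by
  interval_cases c <;> decide

-- ===== VERDICT (by name: the statement is the Claim_ definition above) =====
theorem solution_spec : Claim_equal_solution := by
  intro lottos win_nums _ hpre
  unfold Spec_solution solution solution_alt
  have hsx := PySem.List.sorted_pairwise lottos (fun v => v)
  have hsy := PySem.List.sorted_pairwise win_nums (fun v => v)
  have hfx : (PySem.List.sorted lottos (fun v => v) false).toFinset = lottos.toFinset :=
    List.toFinset_eq_of_perm _ _ (PySem.List.sorted_perm lottos (fun v => v) false)
  have hfy : (PySem.List.sorted win_nums (fun v => v) false).toFinset = win_nums.toFinset :=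
    List.toFinset_eq_of_perm _ _ (PySem.List.sorted_perm win_nums (fun v => v) false)
  have hm : mergeCount (PySem.List.sorted lottos (fun v => v) false)
      (PySem.List.sorted win_nums (fun v => v) false)
      = ((lottos.toFinset ∩ win_nums.toFinset).card : Int) := by
    rw [mergeCount_eq_card _ _ hsx hsy, hfx, hfy]
  unfold Pre_solution at hpre
  simp only [setInterLen, hm]
  set c : Nat := (lottos.toFinset ∩ win_nums.toFinset).card with hc
  set z : Nat := (PySem.List.count lottos 0 : Nat) with hz
  have hc6 : (c : Int) ≤ 6 := by exact_mod_cast hpre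
  have hmax : min (z : Int) (6 - c) + c = min ((c : Int) + z) 6 := by omega
  rw [hmax, pvRanks_getD_eq _ (by omega) (by omega), pvRanks_getD_eq _ (by omega) (by omega)]
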